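-- pv_equiv track=rewrite | github.com/te3/douyin-scrapy | build/lib/douyin/Verification.py | str_to_byte
-- ===== SOURCE A (Python) =====
-- def str_to_byte(strs):
--     length = len(strs)
--     str2 = strs
--     bArr = []
--     i = 0
--     while i < length:
--         a = str2[i]
--         b = str2[1 + i]
--         c = ((str2hex(a) << 4) + str2hex(b))
--         bArr.append(c)
--         i += 2
--     return bArr
--
-- def str2hex(s):
--     odata = 0
--     su = s.upper()
--     for c in su:
--         tmp = ord(c)
--         if tmp <= ord('9'):
--             odata = odata << 4
--             odata += tmp - ord('0')
--         elif ord('A') <= tmp <= ord('F'):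
--             odata = odata << 4
--             odata += tmp - ord('A') + 10
--     return odata
-- ===== SOURCE B (Python) =====
-- def nib(ch):
--     o = ord(ch.upper())
--     if o <= 57:
--         return o - 48
--     if 65 <= o <= 70:
--         return o - 55
--     return 0
--
--
-- def str_to_byte(strs):
--     # deinterleave the string into the high-nibble and low-nibble character
--     # streams with extended slices, then zip-combine them into bytes
--     return [(nib(h) << 4) + nib(l) for h, l in zip(strs[0::2], strs[1::2])]
-- ===== Notes on version B (the rewrite author's own statement) =====
-- stated objective: simpler
-- what changed: Replaces A's indexed while loop, which calls a per-one-char-string accumulator fold (str2hex) twice per step, with deinterleaving the string into two extended slices (strs[0::2] and strs[1::2]) that are zip-combined into bytes in one comprehension; the slicing and zipping run in C, removing the per-character Python-level fold calls.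
import Mathlib
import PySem

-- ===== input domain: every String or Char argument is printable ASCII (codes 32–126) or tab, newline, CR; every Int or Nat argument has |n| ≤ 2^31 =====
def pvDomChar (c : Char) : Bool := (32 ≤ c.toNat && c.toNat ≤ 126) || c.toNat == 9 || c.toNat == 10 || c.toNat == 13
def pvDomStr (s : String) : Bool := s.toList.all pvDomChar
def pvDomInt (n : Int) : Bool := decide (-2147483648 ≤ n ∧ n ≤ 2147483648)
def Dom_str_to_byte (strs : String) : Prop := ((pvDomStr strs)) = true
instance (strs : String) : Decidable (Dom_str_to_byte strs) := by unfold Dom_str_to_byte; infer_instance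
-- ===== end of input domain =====

-- B deinterleaves the string into two extended slices (strs[0::2], strs[1::2]) and zip-combines
-- them into bytes, instead of A's indexed while loop calling a per-string fold twice per step;
-- objective: simpler. A raises IndexError on odd-length input (excluded by Pre_), B returns there.

-- ===== PORT A =====
-- str2hex: fold over the uppercased string, exactly A's accumulator logic ('<< 4' written as '* 16', exact on Int)
def str2hex (s : String) : Int :=
  (PySem.Str.upper s).toList.foldl (fun odata c =>
    let tmp : Int := c.toNat
    if tmp ≤ 57 then odata * 16 + (tmp - 48)
    else if 65 ≤ tmp ∧ tmp ≤ 70 then odata * 16 + (tmp - 65 + 10)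
    else odata) 0

-- A's while loop: consumes two chars per iteration; the one-leftover-char case (where Python raises
-- IndexError on str2[1+i]) is outside Pre_ and returns the accumulated list.
def strToByteGo : List Char → List Int
  | a :: b :: rest => ((str2hex (String.ofList [a])) * 16 + str2hex (String.ofList [b])) :: strToByteGo rest
  | _ => []

def str_to_byte (strs : String) : List Int := strToByteGo strs.toList

-- ===== PORT B =====
def nib (ch : Char) : Int :=
  let o : Int := (PySem.Chars.upperChar ch).toNat
  if o ≤ 57 then o - 48
  else if 65 ≤ o ∧ o ≤ 70 then o - 55
  else 0

-- strs[0::2] / strs[1::2]: extended slices with step 2 ≠ 0, so slice? is always some — getD's [] is unreachable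
def str_to_byte_alt (strs : String) : List Int :=
  ((PySem.List.slice? strs.toList (some 0) none 2).getD []).zip
    ((PySem.List.slice? strs.toList (some 1) none 2).getD [])
    |>.map (fun p => nib p.1 * 16 + nib p.2)

-- ===== PRECONDITION & SPEC =====
-- Pre_ excludes odd-length strings, on which A raises IndexError (B returns the truncated byte list there).
def Pre_str_to_byte (strs : String) : Prop := strs.toList.length % 2 = 0
instance (strs : String) : Decidable (Pre_str_to_byte strs) := by unfold Pre_str_to_byte; infer_instance
def pvWitness_str_to_byte : String := "1aF "

def Spec_str_to_byte (strs : String) (out : List Int) : Prop := out = str_to_byte_alt strs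
instance (strs : String) (out : List Int) : Decidable (Spec_str_to_byte strs out) := by unfold Spec_str_to_byte; infer_instance

-- ===== CLAIM (what is proved, stated in full; the proofs are below) =====
def Claim_equal_str_to_byte : Prop := ∀ (strs : String), Dom_str_to_byte strs → Pre_str_to_byte strs → Spec_str_to_byte strs (str_to_byte strs)

-- ===== LEMMAS AND PROOFS =====
-- the chars at even / odd positions (proof-only characterisation of the two slices)
def evens {α : Type} : List α → List α
  | a :: _ :: r => a :: evens r
  | [a] => [a]
  | [] => []

def odds {α : Type} : List α → List α
  | _ :: b :: r => b :: odds r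
  | _ => []

theorem filter_evens {α : Type} : ∀ (xs : List α),
    List.filterMap (fun k => xs[2 * k]?) (List.range ((xs.length + 1) / 2)) = evens xs
  | [] => by simp [evens]
  | [a] => by simp [evens]
  | a :: b :: r => by
      have h : (a :: b :: r).length + 1 = (r.length + 1) + 1 * 2 := by simp
      rw [h, Nat.add_mul_div_right _ _ (by norm_num), List.range_succ_eq_map]
      simp only [List.filterMap_cons, List.filterMap_map]
      have : (fun k => (a :: b :: r)[2 * (k + 1)]?) ∘ id = fun k => r[2 * k]? := by
        funext k
        show (a :: b :: r)[2 * (k + 1)]? = r[2 * k]?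
        have : 2 * (k + 1) = 2 * k + 1 + 1 := by omega
        rw [this, List.getElem?_cons_succ, List.getElem?_cons_succ]
      simp only [Function.comp_def, id] at this ⊢
      rw [show (fun k => (a :: b :: r)[2 * (k + 1)]?) = fun k => r[2 * k]? from this]
      simp [evens, filter_evens r]

theorem filter_odds {α : Type} : ∀ (xs : List α),
    List.filterMap (fun k => xs[2 * k + 1]?) (List.range (xs.length / 2)) = odds xs
  | [] => by simp [odds]
  | [a] => by simp [odds]
  | a :: b :: r => by
      have h : (a :: b :: r).length = r.length + 1 * 2 := by simp
      rw [h, Nat.add_mul_div_right _ _ (by norm_num), List.range_succ_eq_map]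
      simp only [List.filterMap_cons, List.filterMap_map]
      have : (fun k => (a :: b :: r)[2 * (k + 1) + 1]?) ∘ id = fun k => r[2 * k + 1]? := by
        funext k
        show (a :: b :: r)[2 * (k + 1) + 1]? = r[2 * k + 1]?
        have : 2 * (k + 1) + 1 = (2 * k + 1) + 1 + 1 := by omega
        rw [this, List.getElem?_cons_succ, List.getElem?_cons_succ]
      simp only [Function.comp_def, id] at this ⊢
      rw [show (fun k => (a :: b :: r)[2 * (k + 1) + 1]?) = fun k => r[2 * k + 1]? from this]
      simp [odds, filter_odds r]

theorem slice_evens {α : Type} (xs : List α) :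
    (PySem.List.slice? xs (some 0) none 2).getD [] = evens xs := by
  rw [← filter_evens xs]
  simp only [PySem.List.slice?, PySem.List.sliceIndices]
  norm_num
  have hc : (if 0 < xs.length then (((xs.length : Int) + 2 - 1) / 2).toNat else 0)
      = (xs.length + 1) / 2 := by split <;> omega
  have hf : (fun x : Nat => xs[(2 * (x : Int)).toNat]?) = fun k => xs[2 * k]? := by
    funext k
    have : (2 * (k : Int)).toNat = 2 * k := by omega
    rw [this]
  rw [hc, hf]

theorem slice_odds {α : Type} (xs : List α) :
    (PySem.List.slice? xs (some 1) none 2).getD [] = odds xs := by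
  rw [← filter_odds xs]
  simp only [PySem.List.slice?, PySem.List.sliceIndices]
  norm_num
  have hc : (if 1 < xs.length then
      (((xs.length : Int) - min 1 (xs.length : Int) + 2 - 1) / 2).toNat else 0)
      = xs.length / 2 := by
    have h1 : min 1 (xs.length : Int) = min 1 xs.length := by omega
    rw [h1]; split <;> omega
  have hf : (fun x : Nat => xs[(min 1 (xs.length : Int) + 2 * (x : Int)).toNat]?)
      = fun k => xs[2 * k + 1]? := by
    funext k
    rcases Nat.eq_zero_or_pos xs.length with h | h
    · match xs, h with
      | [], _ => simp
    · have h1 : min 1 (xs.length : Int) = 1 := by omega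
      have : (min 1 (xs.length : Int) + 2 * (k : Int)).toNat = 2 * k + 1 := by rw [h1]; omega
      rw [this]
  rw [hc, hf]

-- per-char agreement: A's fold over a one-char uppercased string equals B's direct nibble
theorem str2hex_single (c : Char) : str2hex (String.ofList [c]) = nib c := by
  simp only [str2hex, nib, PySem.Str.toList_upper, PySem.Chars.upper, String.toList_ofList, List.map_cons,
    List.map_nil, List.foldl_cons, List.foldl_nil]
  split_ifs <;> omega

theorem go_eq : ∀ (l : List Char),
    strToByteGo l = ((evens l).zip (odds l)).map (fun p => nib p.1 * 16 + nib p.2)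
  | [] => by simp [strToByteGo, evens, odds]
  | [a] => by simp [strToByteGo, evens, odds]
  | a :: b :: rest => by
      simp [strToByteGo, evens, odds, str2hex_single, go_eq rest]

-- ===== VERDICT (by name: the statement is the Claim_ definition above) =====
theorem str_to_byte_spec : Claim_equal_str_to_byte := by
  intro strs _ _
  unfold Spec_str_to_byte str_to_byte str_to_byte_alt
  rw [slice_evens, slice_odds]
  exact go_eq strs.toList
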